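-- pv_equiv track=rewrite | github.com/KristynaSodomkova/kata_closest_to_zero_2 | src/kata_closest_to_zero_2/zero.py | create_list_of_indexes_with_highest_scores
-- ===== SOURCE A (Python) =====
-- def how_many_same_letters(word1, word2):
--     score = 0
--     for letter in word1:
--         if letter in word2:
--             score += 1
--     return score
--
-- def create_list_of_scores(list_of_str, given_word):
--     list_of_scores = []
--     for word in list_of_str:
--         list_of_scores.append(how_many_same_letters(word, given_word))
--     return list_of_scores
--
-- def find_max_value(list_of_str, given_word):
--     list_of_scores = create_list_of_scores(list_of_str, given_word)
--     highest_scored_word_value = max(list_of_scores)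
--     return highest_scored_word_value
--
-- def create_list_of_indexes_with_highest_scores(list_of_str, given_word):
--     index_list = []
--     list_of_scores = create_list_of_scores(list_of_str, given_word)
--     max_value = find_max_value(list_of_str, given_word)
--     for index, score in enumerate(list_of_scores, start=0):
--         if score == max_value:
--             index_list.append(index)
--     return index_list
-- ===== SOURCE B (Python) =====
-- def create_list_of_indexes_with_highest_scores(list_of_str, given_word):
--     groups = {}
--     for index, word in enumerate(list_of_str):
--         score = sum(1 for letter in word if letter in given_word)
--         if score in groups:
--             groups[score].append(index)
--         else:
--             groups[score] = [index]
--     best = max(groups)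
--     return groups[best]
-- ===== Notes on version B (the rewrite author's own statement) =====
-- stated objective: alternative
-- what changed: B makes a single pass that scores each word once and groups indices into a dict keyed by score, then returns the group of the maximal key, instead of A's three separate passes (build scores, rescan for max via a second full scoring pass, filter indices).
import Mathlib
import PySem

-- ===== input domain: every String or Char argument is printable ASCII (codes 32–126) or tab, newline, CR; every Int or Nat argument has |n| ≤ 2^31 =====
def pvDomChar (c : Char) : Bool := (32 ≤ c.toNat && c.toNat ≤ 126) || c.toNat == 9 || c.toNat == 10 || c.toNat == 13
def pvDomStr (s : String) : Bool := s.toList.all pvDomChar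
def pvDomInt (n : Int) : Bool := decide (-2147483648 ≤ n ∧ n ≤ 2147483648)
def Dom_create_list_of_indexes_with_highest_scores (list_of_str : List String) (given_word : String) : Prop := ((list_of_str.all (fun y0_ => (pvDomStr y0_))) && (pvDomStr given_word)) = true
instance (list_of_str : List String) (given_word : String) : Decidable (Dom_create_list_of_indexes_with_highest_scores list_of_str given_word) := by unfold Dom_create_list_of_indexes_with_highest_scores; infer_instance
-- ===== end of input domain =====

-- B replaces A's three passes (scores list, a second full scoring pass for max, index filter)
-- by one pass grouping indices in a dict keyed by score, then returns the group of the max key.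

-- ===== PORT A =====
-- how_many_same_letters(word1, word2)
def pvHowManySameLetters (word1 word2 : String) : Int :=
  word1.toList.foldl (fun score letter => if letter ∈ word2.toList then score + 1 else score) 0

-- create_list_of_scores(list_of_str, given_word)
def pvCreateListOfScores (list_of_str : List String) (given_word : String) : List Int :=
  list_of_str.foldl (fun acc word => acc ++ [pvHowManySameLetters word given_word]) []

-- find_max_value(list_of_str, given_word); max([]) raises ValueError in Python: `.getD 0` is
-- junk outside Pre_ only
def pvFindMaxValue (list_of_str : List String) (given_word : String) : Int :=
  (PySem.List.max? (pvCreateListOfScores list_of_str given_word) (fun x => x)).getD 0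

def create_list_of_indexes_with_highest_scores (list_of_str : List String) (given_word : String) : List Int :=
  let list_of_scores := pvCreateListOfScores list_of_str given_word
  let max_value := pvFindMaxValue list_of_str given_word
  (PySem.List.enumerate list_of_scores 0).foldl
    (fun index_list p => if p.2 == max_value then index_list ++ [p.1] else index_list) []

-- ===== PORT B =====
-- score = sum(1 for letter in word if letter in given_word)
def pvScoreB (word given_word : String) : Int :=
  ((word.toList.filter (fun letter => letter ∈ given_word.toList)).map (fun _ => (1 : Int))).sum

-- one loop iteration: append index into the group of its score
def pvGroupStep (given_word : String) (groups : PySem.Dict Int (List Int)) (p : Int × String) :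
    PySem.Dict Int (List Int) :=
  let score := pvScoreB p.2 given_word
  match groups.get? score with
  | some idxs => groups.insert score (idxs ++ [p.1])
  | none => groups.insert score [p.1]

def create_list_of_indexes_with_highest_scores_alt (list_of_str : List String) (given_word : String) : List Int :=
  let groups := (PySem.List.enumerate list_of_str 0).foldl (pvGroupStep given_word) PySem.Dict.empty
  -- best = max(groups); max of an empty dict raises in Python: the `none` branch is outside Pre_
  match PySem.List.max? groups.keys (fun x => x) with
  | none => []
  | some best => groups.getD best []

-- ===== PRECONDITION & SPEC =====
-- Pre_ excludes only the empty list, on which Python's max([]) (in A) and max({}) (in B) raise ValueError.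
def Pre_create_list_of_indexes_with_highest_scores (list_of_str : List String) (given_word : String) : Prop :=
  list_of_str ≠ []
instance (list_of_str : List String) (given_word : String) : Decidable (Pre_create_list_of_indexes_with_highest_scores list_of_str given_word) := by unfold Pre_create_list_of_indexes_with_highest_scores; infer_instance

def pvWitness_create_list_of_indexes_with_highest_scores : List String × String := (["ab", "xy", "ba"], "ab")

def Spec_create_list_of_indexes_with_highest_scores (list_of_str : List String) (given_word : String) (out : List Int) : Prop := out = create_list_of_indexes_with_highest_scores_alt list_of_str given_word
instance (list_of_str : List String) (given_word : String) (out : List Int) : Decidable (Spec_create_list_of_indexes_with_highest_scores list_of_str given_word out) := by unfold Spec_create_list_of_indexes_with_highest_scores; infer_instance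

-- ===== CLAIM (what is proved, stated in full; the proofs are below) =====
def Claim_equal_create_list_of_indexes_with_highest_scores : Prop := ∀ (list_of_str : List String) (given_word : String), Dom_create_list_of_indexes_with_highest_scores list_of_str given_word → Pre_create_list_of_indexes_with_highest_scores list_of_str given_word → Spec_create_list_of_indexes_with_highest_scores list_of_str given_word (create_list_of_indexes_with_highest_scores list_of_str given_word)

-- ===== LEMMAS AND PROOFS =====

-- sum of 1 over a filter is countP
theorem pvSum_ones_filter {α : Type} (p : α → Bool) (l : List α) :
    ((l.filter p).map (fun _ => (1 : Int))).sum = (l.countP p : Int) := by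
  induction l with
  | nil => rfl
  | cons x t ih =>
    by_cases h : p x <;>
      simp [List.filter_cons, List.countP_cons, h, ih, List.countP_eq_length_filter] <;> omega

-- the two scoring helpers agree
theorem pvScore_eq (w g : String) : pvHowManySameLetters w g = pvScoreB w g := by
  unfold pvHowManySameLetters pvScoreB
  rw [PySem.List.foldl_ite_add_one (fun letter => letter ∈ g.toList),
    pvSum_ones_filter (fun letter => decide (letter ∈ g.toList))]
  simp

-- one grouping step, looked up at any key
theorem pvStep_get?_eq (g : String) (d : PySem.Dict Int (List Int)) (q : Int × String) (k : Int)
    (hk : pvScoreB q.2 g ≠ k) : (pvGroupStep g d q).get? k = d.get? k := by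
  unfold pvGroupStep
  cases hs : d.get? (pvScoreB q.2 g) <;> simp only [hs] <;>
    exact PySem.Dict.get?_insert_of_ne d _ (fun h => hk h.symm)

-- one grouping step, key membership
theorem pvStep_mem_keys (g : String) (d : PySem.Dict Int (List Int)) (q : Int × String) (k : Int) :
    k ∈ (pvGroupStep g d q).keys ↔ k = pvScoreB q.2 g ∨ k ∈ d.keys := by
  unfold pvGroupStep
  cases hs : d.get? (pvScoreB q.2 g) <;> simp only [hs] <;>
    exact PySem.Dict.mem_keys_insert d _ k _

-- value of the built dict at any key
theorem pvBuild_get? (g : String) (ps : List (Int × String)) (d : PySem.Dict Int (List Int)) (k : Int) :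
    ((ps.foldl (pvGroupStep g) d).get? k) =
      (match d.get? k with
       | some xs => some (xs ++ (ps.filter (fun p => pvScoreB p.2 g == k)).map (fun p => p.1))
       | none =>
         if (ps.filter (fun p => pvScoreB p.2 g == k)).map (fun p => p.1) = [] then none
         else some ((ps.filter (fun p => pvScoreB p.2 g == k)).map (fun p => p.1))) := by
  induction ps generalizing d with
  | nil => cases h : d.get? k <;> simp [h]
  | cons q t ih =>
    simp only [List.foldl_cons]
    by_cases hk : pvScoreB q.2 g = k
    · cases hd : d.get? k with
      | some xs =>
        have hstep : pvGroupStep g d q = d.insert k (xs ++ [q.1]) := by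
          simp [pvGroupStep, hk, hd]
        rw [hstep, ih]
        simp [PySem.Dict.get?_insert_self, hd, List.filter_cons, hk]
      | none =>
        have hstep : pvGroupStep g d q = d.insert k [q.1] := by
          simp [pvGroupStep, hk, hd]
        rw [hstep, ih]
        simp [PySem.Dict.get?_insert_self, hd, List.filter_cons, hk]
    · rw [ih, pvStep_get?_eq g d q k hk]
      have hf : List.filter (fun p => pvScoreB p.2 g == k) (q :: t)
          = List.filter (fun p => pvScoreB p.2 g == k) t := by
        simp [List.filter_cons, hk]
      rw [hf]

-- keys of the built dict
theorem pvBuild_mem_keys (g : String) (ps : List (Int × String)) (d : PySem.Dict Int (List Int)) (k : Int) :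
    k ∈ (ps.foldl (pvGroupStep g) d).keys ↔ k ∈ d.keys ∨ ∃ p ∈ ps, pvScoreB p.2 g = k := by
  induction ps generalizing d with
  | nil => simp
  | cons q t ih =>
    rw [List.foldl_cons, ih, pvStep_mem_keys]
    rw [List.exists_mem_cons_iff]
    constructor
    · rintro ((h | h) | h)
      · exact Or.inr (Or.inl h.symm)
      · exact Or.inl h
      · exact Or.inr (Or.inr h)
    · rintro (h | (h | h))
      · exact Or.inl (Or.inr h)
      · exact Or.inl (Or.inl h.symm)
      · exact Or.inr h

-- max over two Int lists with the same members
theorem pvMax?_congr (xs ys : List Int) (h : ∀ x, x ∈ xs ↔ x ∈ ys) :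
    PySem.List.max? xs (fun x => x) = PySem.List.max? ys (fun x => x) := by
  cases hx : PySem.List.max? xs (fun x => x) with
  | none =>
    have hxs : xs = [] := (PySem.List.max?_eq_none_iff xs _).mp hx
    subst hxs
    have hys : ys = [] := by
      cases ys with
      | nil => rfl
      | cons y t => exact absurd ((h y).mpr (by simp)) (by simp)
    subst hys
    exact hx.symm
  | some a =>
    cases hy : PySem.List.max? ys (fun x => x) with
    | none =>
      have hys : ys = [] := (PySem.List.max?_eq_none_iff ys _).mp hy
      subst hys
      exact absurd ((h a).mp (PySem.List.max?_mem hx)) (by simp)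
    | some b =>
      have hab : a ≤ b := PySem.List.max?_isMax hy a ((h a).mp (PySem.List.max?_mem hx))
      have hba : b ≤ a := PySem.List.max?_isMax hx b ((h b).mpr (PySem.List.max?_mem hy))
      rw [le_antisymm hab hba]

-- enumerate of a mapped list
theorem pvEnumerate_map {α β : Type} (f : α → β) (l : List α) (s : Int) :
    PySem.List.enumerate (l.map f) s = (PySem.List.enumerate l s).map (fun p => (p.1, f p.2)) := by
  induction l generalizing s with
  | nil => simp [PySem.List.enumerate_nil]
  | cons x t ih => simp [PySem.List.enumerate_cons, ih]

-- A's scores list is a map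
theorem pvScores_eq_map (l : List String) (g : String) :
    pvCreateListOfScores l g = l.map (fun w => pvScoreB w g) := by
  unfold pvCreateListOfScores
  rw [PySem.List.foldl_append_singleton_eq_map]
  simp [pvScore_eq]

-- membership in the scores list = reachable score of some enumerated pair
theorem pvMem_scores_iff (l : List String) (g : String) (k : Int) :
    (k ∈ l.map (fun w => pvScoreB w g)) ↔ ∃ p ∈ PySem.List.enumerate l 0, pvScoreB p.2 g = k := by
  constructor
  · intro hk
    rcases List.mem_map.mp hk with ⟨w, hw, rfl⟩
    rcases List.mem_iff_getElem.mp hw with ⟨j, hj, rfl⟩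
    exact ⟨((j : Int), l[j]), (PySem.List.mem_enumerate_iff _ _ _).mpr ⟨j, hj, by simp⟩, rfl⟩
  · rintro ⟨p, hp, rfl⟩
    rcases (PySem.List.mem_enumerate_iff _ _ _).mp hp with ⟨j, hj, rfl⟩
    exact List.mem_map.mpr ⟨l[j], List.getElem_mem hj, rfl⟩

-- ===== VERDICT (by name: the statement is the Claim_ definition above) =====
theorem create_list_of_indexes_with_highest_scores_spec : Claim_equal_create_list_of_indexes_with_highest_scores := by
  intro l g _ hne
  unfold Spec_create_list_of_indexes_with_highest_scores
  unfold create_list_of_indexes_with_highest_scores create_list_of_indexes_with_highest_scores_alt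
  have hscores : pvCreateListOfScores l g = l.map (fun w => pvScoreB w g) := pvScores_eq_map l g
  have hnil : pvCreateListOfScores l g ≠ [] := by
    rw [hscores]; simpa using hne
  obtain ⟨m, hm⟩ : ∃ m, PySem.List.max? (pvCreateListOfScores l g) (fun x => x) = some m := by
    cases hx : PySem.List.max? (pvCreateListOfScores l g) (fun x => x) with
    | none => exact absurd ((PySem.List.max?_eq_none_iff _ _).mp hx) hnil
    | some a => exact ⟨a, rfl⟩
  have hmv : pvFindMaxValue l g = m := by rw [pvFindMaxValue, hm]; rfl
  have hkeys : ∀ k, k ∈ ((PySem.List.enumerate l 0).foldl (pvGroupStep g) PySem.Dict.empty).keys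
      ↔ k ∈ pvCreateListOfScores l g := by
    intro k
    rw [pvBuild_mem_keys, hscores, pvMem_scores_iff, PySem.Dict.keys_empty]
    simp
  have hmaxk : PySem.List.max? ((PySem.List.enumerate l 0).foldl (pvGroupStep g) PySem.Dict.empty).keys
      (fun x => x) = some m := by
    rw [pvMax?_congr _ (pvCreateListOfScores l g) hkeys, hm]
  have hmem : m ∈ pvCreateListOfScores l g := PySem.List.max?_mem hm
  have hfne : ((PySem.List.enumerate l 0).filter (fun p => pvScoreB p.2 g == m)).map (fun p => p.1) ≠ [] := by
    rw [hscores, pvMem_scores_iff] at hmem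
    rcases hmem with ⟨p, hp, hps⟩
    have hpf : p ∈ (PySem.List.enumerate l 0).filter (fun p => pvScoreB p.2 g == m) :=
      List.mem_filter.mpr ⟨hp, by simp [hps]⟩
    intro hcon
    rw [List.map_eq_nil_iff] at hcon
    rw [hcon] at hpf
    exact absurd hpf (by simp)
  have hget : ((PySem.List.enumerate l 0).foldl (pvGroupStep g) PySem.Dict.empty).get? m =
      some (((PySem.List.enumerate l 0).filter (fun p => pvScoreB p.2 g == m)).map (fun p => p.1)) := by
    rw [pvBuild_get?]
    simp only [PySem.Dict.get?_empty]
    rw [if_neg hfne]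
  simp only [hmaxk, hmv]
  have hA := PySem.List.foldl_append_if (fun (p : Int × Int) => p.2 == m) (fun p => p.1)
    (PySem.List.enumerate (pvCreateListOfScores l g) 0) []
  simp only at hA
  rw [hA]
  rw [hscores, pvEnumerate_map]
  rw [PySem.Dict.getD, hget, Option.getD_some]
  rw [List.filter_map]
  simp only [List.map_map]
  rfl
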